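-- pv_equiv track=rewrite | github.com/dmille56/drawiterm | src/drawiterm/models.py | _orthogonal_arrow_cells
-- ===== SOURCE A (Python) =====
-- def _orthogonal_arrow_cells(
--     sc: int, sr: int, ec: int, er: int
-- ) -> list[tuple[int, int]]:
--     """Return the list of (col, row) cells that an orthogonal arrow occupies."""
--     cells: list[tuple[int, int]] = []
--     # L-shape: horizontal first, then vertical
--     mid_col = ec
--     mid_row = sr
--     # horizontal segment
--     step = 1 if ec >= sc else -1
--     for c in range(sc, ec + step, step):
--         cells.append((c, sr))
--     # vertical segment (skip start of second segment to avoid duplicate)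
--     step = 1 if er >= sr else -1
--     for r in range(sr + step, er + step, step):
--         cells.append((ec, r))
--     return cells
-- ===== SOURCE B (Python) =====
-- def _orthogonal_arrow_cells(
--     sc: int, sr: int, ec: int, er: int
-- ) -> list[tuple[int, int]]:
--     """Return the list of (col, row) cells that an orthogonal arrow occupies."""
--     def sign(x: int) -> int:
--         return (x > 0) - (x < 0)
--
--     # L-shape as corner waypoints; walk cell-by-cell toward each waypoint.
--     start = (sc, sr)
--     cells = [start]
--     cur = start
--     for wx, wy in [(ec, sr), (ec, er)]:
--         while cur != (wx, wy):
--             cur = (cur[0] + sign(wx - cur[0]), cur[1] + sign(wy - cur[1]))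
--             cells.append(cur)
--     return cells
-- ===== Notes on version B (the rewrite author's own statement) =====
-- stated objective: alternative
-- what changed: Replaces the two stepped inclusive ranges by a waypoint walk: build the corner waypoints [(ec,sr),(ec,er)] and step cell-by-cell toward each with a sign step, appending each visited cell; the start cell is seeded once so no skip-first range arithmetic is needed.
import Mathlib
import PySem

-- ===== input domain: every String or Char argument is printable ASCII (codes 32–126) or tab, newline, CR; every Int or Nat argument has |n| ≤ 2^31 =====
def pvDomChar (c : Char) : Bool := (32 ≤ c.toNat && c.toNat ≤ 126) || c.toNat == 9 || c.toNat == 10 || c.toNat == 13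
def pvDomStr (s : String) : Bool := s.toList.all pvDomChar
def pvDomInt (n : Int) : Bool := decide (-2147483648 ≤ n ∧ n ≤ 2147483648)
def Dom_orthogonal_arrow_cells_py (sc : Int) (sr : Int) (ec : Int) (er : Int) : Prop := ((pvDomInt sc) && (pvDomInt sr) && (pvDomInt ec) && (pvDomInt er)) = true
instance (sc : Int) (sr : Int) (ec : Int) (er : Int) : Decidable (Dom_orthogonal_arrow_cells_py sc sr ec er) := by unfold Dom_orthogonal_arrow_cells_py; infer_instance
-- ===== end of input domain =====

-- B replaces A's two stepped inclusive ranges by a cell-by-cell walk toward the corner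
-- waypoints [(ec,sr),(ec,er)] with a sign step (objective: alternative decomposition).

-- ===== PORT A =====
def orthogonal_arrow_cells_py (sc : Int) (sr : Int) (ec : Int) (er : Int) : List (Int × Int) :=
  let cells : List (Int × Int) := []
  -- horizontal segment
  let step : Int := if ec ≥ sc then 1 else -1
  let cells := (PySem.List.pyRange sc (ec + step) step).foldl (fun acc c => acc ++ [(c, sr)]) cells
  -- vertical segment (skip start of second segment to avoid duplicate)
  let step : Int := if er ≥ sr then 1 else -1
  let cells := (PySem.List.pyRange (sr + step) (er + step) step).foldl (fun acc r => acc ++ [(ec, r)]) cells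
  cells

-- ===== PORT B =====
-- (x > 0) - (x < 0)
def pvSign (x : Int) : Int := (if x > 0 then (1 : Int) else 0) - (if x < 0 then (1 : Int) else 0)

-- the inner 'while cur != (wx, wy)' loop; returns (cur, cells) after the loop.
-- fuel = the taxicab distance to the waypoint, a totality guard only: the walk shortens
-- that distance by exactly 1 per iteration, so the fuel never runs out before the test.
def arrowWalk (wx : Int) (wy : Int) (cur : Int × Int) (cells : List (Int × Int)) :
    Nat → (Int × Int) × List (Int × Int)
  | 0 => (cur, cells)
  | fuel + 1 =>
    if cur = (wx, wy) then (cur, cells)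
    else
      let nxt : Int × Int := (cur.1 + pvSign (wx - cur.1), cur.2 + pvSign (wy - cur.2))
      arrowWalk wx wy nxt (cells ++ [nxt]) fuel

def orthogonal_arrow_cells_py_alt (sc : Int) (sr : Int) (ec : Int) (er : Int) : List (Int × Int) :=
  let start : Int × Int := (sc, sr)
  let fin := [(ec, sr), (ec, er)].foldl
    (fun (st : (Int × Int) × List (Int × Int)) wp =>
      arrowWalk wp.1 wp.2 st.1 st.2 ((wp.1 - st.1.1).natAbs + (wp.2 - st.1.2).natAbs))
    (start, [start])
  fin.2

-- ===== PRECONDITION & SPEC =====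
def Spec_orthogonal_arrow_cells_py (sc : Int) (sr : Int) (ec : Int) (er : Int) (out : List (Int × Int)) : Prop := out = orthogonal_arrow_cells_py_alt sc sr ec er
instance (sc : Int) (sr : Int) (ec : Int) (er : Int) (out : List (Int × Int)) : Decidable (Spec_orthogonal_arrow_cells_py sc sr ec er out) := by unfold Spec_orthogonal_arrow_cells_py; infer_instance

-- ===== CLAIM (what is proved, stated in full; the proofs are below) =====
def Claim_equal_orthogonal_arrow_cells_py : Prop := ∀ (sc : Int) (sr : Int) (ec : Int) (er : Int), Dom_orthogonal_arrow_cells_py sc sr ec er → Spec_orthogonal_arrow_cells_py sc sr ec er (orthogonal_arrow_cells_py sc sr ec er)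

-- ===== LEMMAS AND PROOFS =====

theorem pvSign_pos {x : Int} (h : 0 < x) : pvSign x = 1 := by
  unfold pvSign; rw [if_pos h, if_neg (by omega)]; norm_num
theorem pvSign_negone {x : Int} (h : x < 0) : pvSign x = -1 := by
  unfold pvSign; rw [if_neg (by omega), if_pos h]; norm_num
theorem pvSign_zero : pvSign 0 = 0 := by unfold pvSign; norm_num

-- rightward horizontal walk
theorem arrowWalk_right (y : Int) (n : Nat) : ∀ (sx wx : Int) (cells : List (Int × Int)),
    sx ≤ wx → wx - sx = n →
    arrowWalk wx y (sx, y) cells n =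
      ((wx, y), cells ++ (PySem.List.pyRange (sx + 1) (wx + 1) 1).map (fun c => (c, y))) := by
  induction n with
  | zero =>
    intro sx wx cells h1 h2
    have hsx : sx = wx := by omega
    subst hsx
    rw [PySem.List.pyRange_one_eq_nil (by omega)]
    simp [arrowWalk]
  | succ n ih =>
    intro sx wx cells h1 h2
    have hne : ((sx, y) : Int × Int) ≠ (wx, y) := by
      intro he; injection he with hA hB; omega
    rw [arrowWalk, if_neg hne]
    have hs1 : pvSign (wx - sx) = 1 := pvSign_pos (by omega)
    have hs0 : pvSign (y - y) = 0 := by rw [sub_self]; exact pvSign_zero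
    simp only [hs1, hs0, add_zero]
    rw [ih (sx + 1) wx (cells ++ [(sx + 1, y)]) (by omega) (by omega)]
    rw [show PySem.List.pyRange (sx + 1) (wx + 1) 1 = (sx + 1) :: PySem.List.pyRange (sx + 1 + 1) (wx + 1) 1
        from PySem.List.pyRange_one_cons (by omega)]
    simp

theorem arrowWalk_left (y : Int) (n : Nat) : ∀ (sx wx : Int) (cells : List (Int × Int)),
    wx ≤ sx → sx - wx = n →
    arrowWalk wx y (sx, y) cells n =
      ((wx, y), cells ++ (PySem.List.pyRange (sx - 1) (wx - 1) (-1)).map (fun c => (c, y))) := by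
  induction n with
  | zero =>
    intro sx wx cells h1 h2
    have hsx : sx = wx := by omega
    subst hsx
    rw [PySem.List.pyRange_neg_one_eq_nil (by omega)]
    simp [arrowWalk]
  | succ n ih =>
    intro sx wx cells h1 h2
    have hne : ((sx, y) : Int × Int) ≠ (wx, y) := by
      intro he; injection he with hA hB; omega
    rw [arrowWalk, if_neg hne]
    have hs1 : pvSign (wx - sx) = -1 := pvSign_negone (by omega)
    have hs0 : pvSign (y - y) = 0 := by rw [sub_self]; exact pvSign_zero
    simp only [hs1, hs0, add_zero]
    rw [show sx + (-1 : Int) = sx - 1 by ring]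
    rw [ih (sx - 1) wx (cells ++ [(sx - 1, y)]) (by omega) (by omega)]
    rw [show PySem.List.pyRange (sx - 1) (wx - 1) (-1) = (sx - 1) :: PySem.List.pyRange (sx - 1 - 1) (wx - 1) (-1)
        from PySem.List.pyRange_neg_one_cons (by omega)]
    simp

-- downward/upward vertical walk (same column)
theorem arrowWalk_down (x : Int) (n : Nat) : ∀ (sy wy : Int) (cells : List (Int × Int)),
    sy ≤ wy → wy - sy = n →
    arrowWalk x wy (x, sy) cells n =
      ((x, wy), cells ++ (PySem.List.pyRange (sy + 1) (wy + 1) 1).map (fun r => (x, r))) := by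
  induction n with
  | zero =>
    intro sy wy cells h1 h2
    have hsy : sy = wy := by omega
    subst hsy
    rw [PySem.List.pyRange_one_eq_nil (by omega)]
    simp [arrowWalk]
  | succ n ih =>
    intro sy wy cells h1 h2
    have hne : ((x, sy) : Int × Int) ≠ (x, wy) := by
      intro he; injection he with hA hB; omega
    rw [arrowWalk, if_neg hne]
    have hs1 : pvSign (wy - sy) = 1 := pvSign_pos (by omega)
    have hs0 : pvSign (x - x) = 0 := by rw [sub_self]; exact pvSign_zero
    simp only [hs1, hs0, add_zero]
    rw [ih (sy + 1) wy (cells ++ [(x, sy + 1)]) (by omega) (by omega)]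
    rw [show PySem.List.pyRange (sy + 1) (wy + 1) 1 = (sy + 1) :: PySem.List.pyRange (sy + 1 + 1) (wy + 1) 1
        from PySem.List.pyRange_one_cons (by omega)]
    simp

theorem arrowWalk_up (x : Int) (n : Nat) : ∀ (sy wy : Int) (cells : List (Int × Int)),
    wy ≤ sy → sy - wy = n →
    arrowWalk x wy (x, sy) cells n =
      ((x, wy), cells ++ (PySem.List.pyRange (sy - 1) (wy - 1) (-1)).map (fun r => (x, r))) := by
  induction n with
  | zero =>
    intro sy wy cells h1 h2
    have hsy : sy = wy := by omega
    subst hsy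
    rw [PySem.List.pyRange_neg_one_eq_nil (by omega)]
    simp [arrowWalk]
  | succ n ih =>
    intro sy wy cells h1 h2
    have hne : ((x, sy) : Int × Int) ≠ (x, wy) := by
      intro he; injection he with hA hB; omega
    rw [arrowWalk, if_neg hne]
    have hs1 : pvSign (wy - sy) = -1 := pvSign_negone (by omega)
    have hs0 : pvSign (x - x) = 0 := by rw [sub_self]; exact pvSign_zero
    simp only [hs1, hs0, add_zero]
    rw [show sy + (-1 : Int) = sy - 1 by ring]
    rw [ih (sy - 1) wy (cells ++ [(x, sy - 1)]) (by omega) (by omega)]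
    rw [show PySem.List.pyRange (sy - 1) (wy - 1) (-1) = (sy - 1) :: PySem.List.pyRange (sy - 1 - 1) (wy - 1) (-1)
        from PySem.List.pyRange_neg_one_cons (by omega)]
    simp

-- ===== VERDICT (by name: the statement is the Claim_ definition above) =====
theorem orthogonal_arrow_cells_py_spec : Claim_equal_orthogonal_arrow_cells_py := by
  intro sc sr ec er _
  unfold Spec_orthogonal_arrow_cells_py orthogonal_arrow_cells_py orthogonal_arrow_cells_py_alt
  simp only [List.foldl]
  by_cases h1 : ec ≥ sc
  · rw [if_pos h1,
        show (ec - sc).natAbs + (sr - sr).natAbs = (ec - sc).toNat by omega,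
        arrowWalk_right sr (ec - sc).toNat sc ec [(sc, sr)] h1 (by omega)]
    dsimp only
    by_cases h2 : er ≥ sr
    · rw [if_pos h2,
          show (ec - ec).natAbs + (er - sr).natAbs = (er - sr).toNat by omega,
          arrowWalk_down ec (er - sr).toNat sr er _ h2 (by omega)]
      rw [PySem.List.foldl_append_singleton_eq_map, PySem.List.foldl_append_singleton_eq_map]
      rw [show PySem.List.pyRange sc (ec + 1) 1 = sc :: PySem.List.pyRange (sc + 1) (ec + 1) 1
          from PySem.List.pyRange_one_cons (by omega)]
      simp
    · rw [if_neg h2,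
          show (ec - ec).natAbs + (er - sr).natAbs = (sr - er).toNat by omega,
          arrowWalk_up ec (sr - er).toNat sr er _ (by omega) (by omega)]
      rw [PySem.List.foldl_append_singleton_eq_map, PySem.List.foldl_append_singleton_eq_map]
      rw [show PySem.List.pyRange sc (ec + 1) 1 = sc :: PySem.List.pyRange (sc + 1) (ec + 1) 1
          from PySem.List.pyRange_one_cons (by omega)]
      simp [show sr + (-1 : Int) = sr - 1 by ring, show er + (-1 : Int) = er - 1 by ring]
  · rw [if_neg h1,
        show (ec - sc).natAbs + (sr - sr).natAbs = (sc - ec).toNat by omega,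
        arrowWalk_left sr (sc - ec).toNat sc ec [(sc, sr)] (by omega) (by omega)]
    dsimp only
    by_cases h2 : er ≥ sr
    · rw [if_pos h2,
          show (ec - ec).natAbs + (er - sr).natAbs = (er - sr).toNat by omega,
          arrowWalk_down ec (er - sr).toNat sr er _ h2 (by omega)]
      rw [PySem.List.foldl_append_singleton_eq_map, PySem.List.foldl_append_singleton_eq_map]
      rw [show ec + (-1 : Int) = ec - 1 by ring]
      rw [show PySem.List.pyRange sc (ec - 1) (-1) = sc :: PySem.List.pyRange (sc - 1) (ec - 1) (-1)
          from PySem.List.pyRange_neg_one_cons (by omega)]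
      simp
    · rw [if_neg h2,
          show (ec - ec).natAbs + (er - sr).natAbs = (sr - er).toNat by omega,
          arrowWalk_up ec (sr - er).toNat sr er _ (by omega) (by omega)]
      rw [PySem.List.foldl_append_singleton_eq_map, PySem.List.foldl_append_singleton_eq_map]
      rw [show ec + (-1 : Int) = ec - 1 by ring, show sr + (-1 : Int) = sr - 1 by ring,
          show er + (-1 : Int) = er - 1 by ring]
      rw [show PySem.List.pyRange sc (ec - 1) (-1) = sc :: PySem.List.pyRange (sc - 1) (ec - 1) (-1)
          from PySem.List.pyRange_neg_one_cons (by omega)]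
      simp
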